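-- pv_equiv track=rewrite | github.com/NewGitter2017/tket | pytket/pytket/mbqc_compile/mpattern.py | layer_list
-- ===== SOURCE A (Python) =====
-- def layer_list(layers: dict) -> list:
--     """
--     This method takes a dictionary which maps each vertex in a zx diagram
--     to a correction layer as input. It then produces a list of sets of
--     vertices as output. The sets in the list represent the layers of
--     measurements for the diagram in ascending order.
--
--     :param layers:  Dictionary mapping vertices to their correction layer.
--     :param type:    dict
--
--     :returns:       A list of sets containing integers.
--     :rtype:         list (of integers)
--     """
--     new_list = []
--     depth = -1
--     for vertex in layers.keys():
--         layer = layers[vertex]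
--         if layer > depth:
--             diff = layer - depth
--             new_list += [set() for i in range(diff)]
--             depth = layer
--         new_list[layer] |= {vertex}
--     return new_list
-- ===== SOURCE B (Python) =====
-- def layer_list(layers: dict) -> list:
--     groups = {}
--     for vertex, layer in layers.items():
--         groups.setdefault(layer, set()).add(vertex)
--     depth = max(layers.values(), default=-1)
--     return [groups.get(layer, set()) for layer in range(depth + 1)]
-- ===== Notes on version B (the rewrite author's own statement) =====
-- stated objective: simpler
-- what changed: A interleaves growing the output list with a running depth and indexed in-place set unions; B instead groups vertices by layer into a dictionary in one pass, computes the depth as max of the values, and emits the list with a comprehension over range(depth+1). Pre_ excludes dicts containing a negative layer value: there A raises IndexError unless the list grown so far happens to be long enough, and where it does return, the vertex's placement comes from Python's negative-index wraparound, an artefact no caller of this layering function would specify; B ignores such vertices.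
-- outside the precondition, e.g. on layer_list({5: 2, 7: -1}): A returns [set(), set(), {5, 7}], B returns [set(), set(), {5}]; on layer_list({1: -2}): A raises IndexError, B returns []
import Mathlib
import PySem

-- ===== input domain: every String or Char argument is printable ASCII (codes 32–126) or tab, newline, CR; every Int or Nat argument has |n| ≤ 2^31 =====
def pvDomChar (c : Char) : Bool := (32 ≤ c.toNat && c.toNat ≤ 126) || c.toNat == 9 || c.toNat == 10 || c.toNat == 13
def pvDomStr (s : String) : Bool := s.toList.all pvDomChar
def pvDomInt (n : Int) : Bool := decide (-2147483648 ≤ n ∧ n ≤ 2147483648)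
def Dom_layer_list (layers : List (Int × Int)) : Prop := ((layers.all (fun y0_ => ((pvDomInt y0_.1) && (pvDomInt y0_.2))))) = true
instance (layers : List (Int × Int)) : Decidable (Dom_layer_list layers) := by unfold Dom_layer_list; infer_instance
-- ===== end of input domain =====

-- B replaces A's interleaved list-growth-with-running-depth by a one-pass grouping dict, a max over the values, and a range comprehension (objective: simpler).

-- ===== PORT A =====
-- one iteration of A's 'for vertex in layers.keys()' loop; state = (new_list, depth)
def layerListStepA (d : PySem.Dict Int Int) (st : List (List Int) × Int) (vertex : Int) : List (List Int) × Int :=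
  let layer := PySem.Dict.getD d vertex 0
  let grown : List (List Int) × Int :=
    if layer > st.2 then
      (st.1 ++ (PySem.List.pyRange 0 (layer - st.2) 1).map (fun _ => PySem.Set.empty), layer)
    else (st.1, st.2)
  match PySem.List.pyGet? grown.1 layer with
  | some s => (PySem.List.pySetD grown.1 layer (PySem.Set.union s [vertex]), grown.2)
  | none => grown   -- Python raises IndexError here; such inputs are outside Pre_

def layer_list (layers : List (Int × Int)) : List (List Int) :=
  let d := PySem.Dict.ofList layers
  ((PySem.Dict.keys d).foldl (layerListStepA d) ([], -1)).1

-- ===== PORT B =====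
def layer_list_alt (layers : List (Int × Int)) : List (List Int) :=
  let d := PySem.Dict.ofList layers
  let groups := (PySem.Dict.items d).foldl
    (fun g p => PySem.Dict.modify g p.2 PySem.Set.empty (fun s => PySem.Set.add s p.1))
    PySem.Dict.empty
  let depth := (PySem.List.max? (PySem.Dict.values d) (fun y => y)).getD (-1)
  (PySem.List.pyRange 0 (depth + 1) 1).map (fun layer => PySem.Dict.getD groups layer PySem.Set.empty)

-- ===== PRECONDITION & SPEC =====
-- Pre_ excludes dicts containing a negative layer value: there A raises IndexError unless the list grown
-- so far happens to be long enough, and where it does return, the vertex's placement is a negative-index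
-- wraparound artefact no caller would specify; B ignores such vertices.
def Pre_layer_list (layers : List (Int × Int)) : Prop :=
  ∀ p ∈ PySem.Dict.items (PySem.Dict.ofList layers), 0 ≤ p.2
instance (layers : List (Int × Int)) : Decidable (Pre_layer_list layers) := by unfold Pre_layer_list; infer_instance
def pvWitness_layer_list : (List (Int × Int)) := [(0, 0), (3, 1), (5, 0), (3, 2)]

def Spec_layer_list (layers : List (Int × Int)) (out : List (List Int)) : Prop := out = layer_list_alt layers
instance (layers : List (Int × Int)) (out : List (List Int)) : Decidable (Spec_layer_list layers out) := by unfold Spec_layer_list; infer_instance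

-- ===== CLAIM (what is proved, stated in full; the proofs are below) =====
def Claim_equal_layer_list : Prop := ∀ (layers : List (Int × Int)), Dom_layer_list layers → Pre_layer_list layers → Spec_layer_list layers (layer_list layers)

-- ===== LEMMAS AND PROOFS =====
-- vertsAt l i: the vertices of l whose layer is i, in order; dmax l: the running maximum of the layers from -1
def vertsAt (l : List (Int × Int)) (i : Int) : List Int := (l.filter (fun p => p.2 == i)).map Prod.fst
def dmax (l : List (Int × Int)) : Int := l.foldl (fun d p => max d p.2) (-1)

-- the same step with the (vertex, layer) pair given directly, no dict lookup
def stepP (st : List (List Int) × Int) (p : Int × Int) : List (List Int) × Int :=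
  let grown : List (List Int) × Int :=
    if p.2 > st.2 then
      (st.1 ++ (PySem.List.pyRange 0 (p.2 - st.2) 1).map (fun _ => PySem.Set.empty), p.2)
    else (st.1, st.2)
  match PySem.List.pyGet? grown.1 p.2 with
  | some s => (PySem.List.pySetD grown.1 p.2 (PySem.Set.union s [p.1]), grown.2)
  | none => grown

theorem set_add_of_not_mem (s : List Int) (k : Int) (h : k ∉ s) :
    PySem.Set.add s k = s ++ [k] := by
  simp [PySem.Set.add, PySem.Set.contains, h]

theorem set_union_singleton (s : List Int) (k : Int) (h : k ∉ s) :
    PySem.Set.union s [k] = s ++ [k] := set_add_of_not_mem s k h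

theorem foldl_max_init_le (xs : List Int) (i : Int) : i ≤ xs.foldl max i := by
  induction xs generalizing i with
  | nil => simp
  | cons x t ih => exact le_trans (le_max_left i x) (ih _)

theorem foldl_max_le_of_mem (xs : List Int) (i a : Int) (h : a ∈ xs) : a ≤ xs.foldl max i := by
  induction xs generalizing i with
  | nil => simp at h
  | cons x t ih =>
    rcases List.mem_cons.mp h with rfl | h
    · exact le_trans (le_max_right i a) (foldl_max_init_le _ _)
    · exact ih _ h

theorem neg_one_le_dmax (l : List (Int × Int)) : -1 ≤ dmax l := by
  have : dmax l = (l.map Prod.snd).foldl max (-1) := by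
    simp [dmax, List.foldl_map]
  rw [this]; exact foldl_max_init_le _ _

theorem snd_le_dmax (l : List (Int × Int)) (p : Int × Int) (hp : p ∈ l) : p.2 ≤ dmax l := by
  have : dmax l = (l.map Prod.snd).foldl max (-1) := by
    simp [dmax, List.foldl_map]
  rw [this]
  exact foldl_max_le_of_mem _ _ _ (List.mem_map_of_mem hp)

theorem dmax_append (l : List (Int × Int)) (p : Int × Int) :
    dmax (l ++ [p]) = max (dmax l) p.2 := by
  simp [dmax, List.foldl_append]

theorem vertsAt_append (l : List (Int × Int)) (p : Int × Int) (i : Int) :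
    vertsAt (l ++ [p]) i = vertsAt l i ++ if p.2 = i then [p.1] else [] := by
  by_cases h : p.2 = i <;> simp [vertsAt, List.filter_append, h]

theorem vertsAt_eq_nil_of_gt (l : List (Int × Int)) (i : Int) (h : dmax l < i) :
    vertsAt l i = [] := by
  simp only [vertsAt, List.map_eq_nil_iff, List.filter_eq_nil_iff]
  intro p hp hpi
  have := snd_le_dmax l p hp
  have : p.2 = i := by simpa using hpi
  omega

theorem vertsAt_subset_fst (l : List (Int × Int)) (i : Int) (x : Int) (hx : x ∈ vertsAt l i) :
    x ∈ l.map Prod.fst := by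
  simp only [vertsAt, List.mem_map] at hx ⊢
  obtain ⟨p, hp, rfl⟩ := hx
  exact ⟨p, List.mem_of_mem_filter hp, rfl⟩

-- the model of A's fold
theorem foldA_char (l : List (Int × Int)) (hn : (l.map Prod.fst).Nodup)
    (hnn : ∀ p ∈ l, 0 ≤ p.2) :
    l.foldl stepP ([], -1) = ((PySem.List.pyRange 0 (dmax l + 1) 1).map (vertsAt l), dmax l) := by
  induction l using List.reverseRecOn with
  | nil => simp [dmax]
  | append_singleton l q ih =>
    obtain ⟨k, v⟩ := q
    rw [List.map_append] at hn
    have hn2 := List.Nodup.of_append_left hn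
    have hn' : (l.map Prod.fst).Nodup := hn2
    have hk : k ∉ l.map Prod.fst := fun hmem =>
      (List.disjoint_of_nodup_append hn) hmem (by simp)
    have hnn' : ∀ p ∈ l, 0 ≤ p.2 := fun p hp => hnn p (List.mem_append_left _ hp)
    have hv : (0:Int) ≤ v := by
      have := hnn (k, v) (List.mem_append_right _ (List.mem_singleton_self _)); simpa using this
    have hD : -1 ≤ dmax l := neg_one_le_dmax l
    rw [List.foldl_append, List.foldl_cons, List.foldl_nil, ih hn' hnn']
    rw [dmax_append]
    set D := dmax l with hDdef
    set L := (PySem.List.pyRange 0 (D + 1) 1).map (vertsAt l) with hLdef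
    have hLlen : L.length = (D + 1).toNat := by
      simp [hLdef, PySem.List.length_pyRange_one]
    have hLget : ∀ (j : Nat) (hj : j < L.length), L[j] = vertsAt l (j : Int) := by
      intro j hj
      simp only [hLdef, List.getElem_map, PySem.List.getElem_pyRange_one]
      norm_num
    by_cases hvD : v > D
    · -- the new layer extends the list
      have hmax : max D v = v := max_eq_right (le_of_lt hvD)
      rw [hmax]
      simp only [stepP]
      rw [if_pos (by simpa using hvD)]
      set pad := (PySem.List.pyRange 0 (v - D) 1).map (fun _ => (PySem.Set.empty : List Int)) with hpaddef
      have hpadlen : pad.length = (v - D).toNat := by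
        simp [hpaddef, PySem.List.length_pyRange_one]
      have hglen : (L ++ pad).length = (v + 1).toNat := by
        rw [List.length_append, hLlen, hpadlen]; omega
      have hlt : v < ((L ++ pad).length : Int) := by rw [hglen]; omega
      have hgetv : PySem.List.pyGet? (L ++ pad) v = some [] := by
        rw [PySem.List.pyGet?_eq_some_getElem _ hv hlt]
        congr 1
        rw [List.getElem_append_right (by omega)]
        simp [hpaddef, PySem.Set.empty]
      rw [hgetv]
      show (PySem.List.pySetD (L ++ pad) v (PySem.Set.union ([] : List Int) [k]), v) =
        (List.map (vertsAt (l ++ [(k, v)])) (PySem.List.pyRange 0 (v + 1) 1), v)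
      have hunion : PySem.Set.union ([] : List Int) [k] = [k] := by
        simpa using set_union_singleton [] k (by simp)
      rw [hunion]
      rw [PySem.List.pySetD_of_nonneg _ _ hv]
      rw [Prod.mk.injEq]
      refine ⟨?_, rfl⟩
      apply List.ext_getElem
      · rw [List.length_set, hglen]
        simp [PySem.List.length_pyRange_one]
      · intro j hj1 hj2
        rw [List.length_set, hglen] at hj1
        simp only [List.getElem_set, List.getElem_map, PySem.List.getElem_pyRange_one,
          vertsAt_append]
        by_cases hjv : v.toNat = j
        · rw [if_pos hjv, if_pos (by omega : v = 0 + (j : Int)),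
            vertsAt_eq_nil_of_gt l _ (by omega)]
          simp
        · rw [if_neg hjv, if_neg (by omega : ¬ v = 0 + (j : Int)), List.append_nil]
          by_cases hjL : j < L.length
          · rw [List.getElem_append_left hjL, hLget j hjL]
            norm_num
          · rw [List.getElem_append_right (by omega)]
            rw [vertsAt_eq_nil_of_gt l _ (by rw [hLlen] at hjL; omega)]
            simp [hpaddef, PySem.Set.empty]
    · -- the layer fits in the existing list
      have hvle : v ≤ D := not_lt.mp hvD
      have hmax : max D v = D := max_eq_left hvle
      rw [hmax]
      simp only [stepP]
      rw [if_neg (by simpa using hvD)]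
      have hlt : v < (L.length : Int) := by rw [hLlen]; omega
      have hgetv : PySem.List.pyGet? L v = some (vertsAt l v) := by
        rw [PySem.List.pyGet?_eq_some_getElem _ hv hlt]
        congr 1
        rw [hLget v.toNat (by omega)]
        congr 1
        omega
      rw [hgetv]
      show (PySem.List.pySetD L v (PySem.Set.union (vertsAt l v) [k]), D) =
        (List.map (vertsAt (l ++ [(k, v)])) (PySem.List.pyRange 0 (D + 1) 1), D)
      have hknot : k ∉ vertsAt l v := fun hmem => hk (vertsAt_subset_fst l v k hmem)
      rw [set_union_singleton _ _ hknot]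
      rw [PySem.List.pySetD_of_nonneg _ _ hv]
      rw [Prod.mk.injEq]
      refine ⟨?_, rfl⟩
      apply List.ext_getElem
      · rw [List.length_set, hLlen]
        simp [PySem.List.length_pyRange_one]
      · intro j hj1 hj2
        rw [List.length_set, hLlen] at hj1
        simp only [List.getElem_set, List.getElem_map, PySem.List.getElem_pyRange_one,
          vertsAt_append]
        by_cases hjv : v.toNat = j
        · rw [if_pos hjv, if_pos (by omega : v = 0 + (j : Int))]
          rw [(by omega : (0:Int) + (j : Int) = v)]
        · rw [if_neg hjv, if_neg (by omega : ¬ v = 0 + (j : Int)), List.append_nil]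
          rw [hLget j (by omega)]
          norm_num

theorem keysFold_eq_itemsFold (d : PySem.Dict Int Int) (hn : (PySem.Dict.keys d).Nodup)
    (init : List (List Int) × Int) :
    (PySem.Dict.keys d).foldl (layerListStepA d) init = (PySem.Dict.items d).foldl stepP init := by
  have hkeys : PySem.Dict.keys d = (PySem.Dict.items d).map Prod.fst := by
    simp only [PySem.Dict.keys]
  rw [hkeys, List.foldl_map]
  apply PySem.List.foldl_congr_mem
  intro acc p hp
  obtain ⟨a, b⟩ := p
  have hget : PySem.Dict.getD d a 0 = b := PySem.Dict.getD_of_mem_items d hp hn 0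
  simp only [layerListStepA, stepP, hget]

theorem groups_getD (l : List (Int × Int)) :
    (l.map Prod.fst).Nodup → ∀ i : Int,
    (l.foldl
      (fun g p => PySem.Dict.modify g p.2 PySem.Set.empty (fun s => PySem.Set.add s p.1))
      PySem.Dict.empty).getD i PySem.Set.empty = vertsAt l i := by
  induction l using List.reverseRecOn with
  | nil => intro _ i; simp [vertsAt, PySem.Dict.getD_empty]
  | append_singleton l q ih =>
    intro hn i
    obtain ⟨k, v⟩ := q
    rw [List.map_append] at hn
    have hn' : (l.map Prod.fst).Nodup := List.Nodup.of_append_left hn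
    have hk : k ∉ l.map Prod.fst := fun hmem =>
      (List.disjoint_of_nodup_append hn) hmem (by simp)
    rw [List.foldl_append, List.foldl_cons, List.foldl_nil, PySem.Dict.getD_modify,
      vertsAt_append]
    by_cases hiv : i = v
    · rw [if_pos hiv, ih hn' v, hiv,
        set_add_of_not_mem _ _ (fun hm => hk (vertsAt_subset_fst l v k hm))]
      rw [if_pos rfl]
    · rw [if_neg hiv, ih hn' i, if_neg (fun h => hiv h.symm)]
      simp

theorem depth_eq (l : List (Int × Int)) (hnn : ∀ p ∈ l, 0 ≤ p.2) :
    (PySem.List.max? (l.map Prod.snd) (fun y => y)).getD (-1) = dmax l := by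
  cases l with
  | nil => rfl
  | cons p t =>
    have h0 : (0:Int) ≤ p.2 := hnn p (by simp)
    rw [List.map_cons, PySem.List.max?_id_cons]
    show (t.map Prod.snd).foldl max p.2 = dmax (p :: t)
    simp only [dmax, List.foldl_cons]
    rw [max_eq_right (by omega : (-1:Int) ≤ p.2), List.foldl_map]

-- ===== VERDICT (by name: the statement is the Claim_ definition above) =====
theorem layer_list_spec : Claim_equal_layer_list := by
  intro layers _ hpre
  show layer_list layers = layer_list_alt layers
  have hkn : (PySem.Dict.ofList layers).keys.Nodup := PySem.Dict.nodup_keys_ofList _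
  have hitems : ((PySem.Dict.ofList layers).items.map Prod.fst).Nodup := by
    simpa only [PySem.Dict.keys] using hkn
  have hnn : ∀ p ∈ (PySem.Dict.ofList layers).items, 0 ≤ p.2 := hpre
  simp only [layer_list, layer_list_alt]
  rw [keysFold_eq_itemsFold _ hkn, foldA_char _ hitems hnn]
  have hvals : PySem.Dict.values (PySem.Dict.ofList layers) =
      (PySem.Dict.ofList layers).items.map Prod.snd := by
    simp only [PySem.Dict.values]
  rw [hvals, depth_eq _ hnn]
  exact List.map_congr_left (fun i _ => (groups_getD _ hitems i).symm)
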